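-- pv_equiv track=rewrite | github.com/ganesh93/OnSharp-Inc.-Coding-Challenge-Submission---2-12-2021 | bowling01/bowling01_Functions.py | refactorData
-- ===== SOURCE A (Python) =====
-- def refactorData(pkd):
--     # Returns a tuple with data in a different format which simplifies the
--     # scoring logic.
--     # Paramters:
--     # pkd - shot scores organized by frame. Nested list. List with nFrame number
--     #       of list elements. Each elent is a list of integers representing the
--     #       scores for the shots taken in that frame.
--     #
--     # Return Values:
--     # shotIndByFrame - List of lists. Stores an index for each shot taken on
--     #                  each frame. List is nFrames in length. Each element is
--     #                  a list of indices that correspond to each shot taken in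
--     #                  frame. The index refers to anotbher list that has all
--     #                  scores for every shot taken.
--     # shotScores - A list of pins knocked down for every shot taken in order
--     #              from first to last. There is no frame information here.
--     nFrames = 10
--     shotIndByFrame = [[] for i in range(nFrames)]
--     shotScores = []
--     shotIndex = 0
--     # iterate through all the shot scores frame by frame
--     for i in range(len(pkd)):
--         for j in range(len(pkd[i])):
--             shotIndByFrame[i].append(shotIndex)
--             shotScores.append(pkd[i][j])
--             shotIndex += 1
--     return shotIndByFrame,shotScores
-- ===== SOURCE B (Python) =====
-- def refactorData(pkd):
--     # Recursive decomposition: a helper builds, front to back, the pair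
--     # (index lists, flattened scores) for the remaining frames given the
--     # running offset; afterwards the index table is padded with empty lists
--     # up to the fixed 10 frames.
--     def go(frames, offset):
--         if not frames:
--             return [], []
--         frame = frames[0]
--         inds, scores = go(frames[1:], offset + len(frame))
--         return [list(range(offset, offset + len(frame)))] + inds, list(frame) + scores
--     shotIndByFrame, shotScores = go(pkd, 0)
--     shotIndByFrame += [[] for _ in range(10 - len(pkd))]
--     return shotIndByFrame, shotScores
-- ===== Notes on version B (the rewrite author's own statement) =====
-- stated objective: alternative
-- what changed: Replaces A's imperative interleaved shot-by-shot loop over a pre-allocated mutable 10-slot table with a recursion over the frame list that returns (index lists, flattened scores) pairs built by concatenation, followed by a padding step up to 10 frames.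
import Mathlib
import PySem

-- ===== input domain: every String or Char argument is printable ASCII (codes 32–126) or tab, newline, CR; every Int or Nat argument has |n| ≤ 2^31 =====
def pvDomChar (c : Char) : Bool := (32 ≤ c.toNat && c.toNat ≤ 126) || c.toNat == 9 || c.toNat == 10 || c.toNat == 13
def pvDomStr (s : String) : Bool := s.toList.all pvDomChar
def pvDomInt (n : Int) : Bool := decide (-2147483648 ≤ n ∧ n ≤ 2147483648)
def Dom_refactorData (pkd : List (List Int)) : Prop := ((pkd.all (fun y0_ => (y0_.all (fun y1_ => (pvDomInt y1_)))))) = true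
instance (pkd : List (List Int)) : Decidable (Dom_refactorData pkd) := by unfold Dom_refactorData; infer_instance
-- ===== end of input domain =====

-- B builds the result by recursion over the frame list (pairs built by concatenation,
-- then padded to 10) instead of A's interleaved shot-by-shot loop over a mutable table;
-- alternative decomposition, same cost.


-- ===== PORT A =====
def refactorData (pkd : List (List Int)) : List (List Int) × List Int :=
  -- nFrames = 10; shotIndByFrame = [[] for i in range(nFrames)]; shotScores = []; shotIndex = 0
  -- state = (shotIndByFrame, shotScores, shotIndex)
  let st :=
    (PySem.List.pyRange 0 (PySem.List.len pkd) 1).foldl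
      (fun (st : List (List Int) × List Int × Int) i =>
        -- pkd[i] is in range, since i ∈ range(len(pkd)) (pyGetD is exact there)
        let frame := PySem.List.pyGetD pkd i []
        (PySem.List.pyRange 0 (PySem.List.len frame) 1).foldl
          (fun (st : List (List Int) × List Int × Int) j =>
            -- shotIndByFrame[i].append(shotIndex): Python raises IndexError when i ≥ 10;
            -- those inputs are excluded by Pre_ below
            (st.1.modify i.toNat (· ++ [st.2.2]),
             st.2.1 ++ [PySem.List.pyGetD frame j 0],
             st.2.2 + 1)) st)
      (List.replicate 10 [], [], 0)
  (st.1, st.2.1)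

-- ===== PORT B =====
-- def go(frames, offset): recursion over the remaining frames with the running offset
def pvGo : List (List Int) → Int → List (List Int) × List Int
  | [], _ => ([], [])
  | f :: rest, off =>
      let r := pvGo rest (off + f.length)
      (PySem.List.pyRange off (off + (f.length : Int)) 1 :: r.1, f ++ r.2)

def refactorData_alt (pkd : List (List Int)) : List (List Int) × List Int :=
  -- shotIndByFrame, shotScores = go(pkd, 0)
  let p := pvGo pkd 0
  -- shotIndByFrame += [[] for _ in range(10 - len(pkd))]
  (p.1 ++ List.replicate (10 - pkd.length) [], p.2)

-- ===== PRECONDITION & SPEC =====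
-- Pre_ excludes inputs with more than 10 frames: there Python A raises IndexError on the first
-- shot of a frame past the tenth, and the only >10-frame inputs on which A still returns (every
-- frame past the tenth empty) return a value only because the inner loop never runs — an
-- accident of A's interleaving; B returns all frames' index lists there.
def Pre_refactorData (pkd : List (List Int)) : Prop := pkd.length ≤ 10
instance (pkd : List (List Int)) : Decidable (Pre_refactorData pkd) := by unfold Pre_refactorData; infer_instance
def pvWitness_refactorData : List (List Int) := [[7, 2], [10], [], [3, 4]]

def Spec_refactorData (pkd : List (List Int)) (out : List (List Int) × List Int) : Prop := out = refactorData_alt pkd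
instance (pkd : List (List Int)) (out : List (List Int) × List Int) : Decidable (Spec_refactorData pkd out) := by unfold Spec_refactorData; infer_instance

-- ===== CLAIM (what is proved, stated in full; the proofs are below) =====
def Claim_equal_refactorData : Prop := ∀ (pkd : List (List Int)), Dom_refactorData pkd → Pre_refactorData pkd → Spec_refactorData pkd (refactorData pkd)

-- ===== LEMMAS AND PROOFS =====

-- A's inner loop over one frame: appends the index range [idx, idx+len) to slot iN,
-- the frame itself to the scores, and advances the counter by the frame length.
lemma pv_innerA (frame : List Int) (iN : Nat) (sibf : List (List Int)) (ss : List Int) (idx : Int) :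
    frame.foldl (fun (st : List (List Int) × List Int × Int) x =>
        (st.1.modify iN (· ++ [st.2.2]), st.2.1 ++ [x], st.2.2 + 1)) (sibf, ss, idx)
      = (sibf.modify iN (· ++ PySem.List.pyRange idx (idx + frame.length) 1),
         ss ++ frame, idx + frame.length) := by
  induction frame generalizing sibf ss idx with
  | nil =>
      simp only [List.foldl_nil, List.length_nil, Nat.cast_zero, add_zero, List.append_nil,
        PySem.List.pyRange_one_eq_nil (le_refl idx)]
      simp
      exact (List.modify_id iN sibf).symm
  | cons x xs ih =>
      simp only [List.foldl_cons, ih, List.modify_modify_eq]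
      rw [PySem.List.pyRange_one_cons (show (idx : Int) < idx + ((x :: xs).length : Int) by simp)]
      have hc : idx + ((x :: xs).length : Int) = idx + 1 + (xs.length : Int) := by simp; ring
      rw [hc]
      simp [Prod.ext_iff]
      congr 1
      funext l
      simp

-- appending to an empty slot is the same as overwriting it (out of range: both no-ops)
lemma pv_modify_eq_set (sibf : List (List Int)) (i : Nat) (r : List Int)
    (h : ∀ k (_ : k < sibf.length), i ≤ k → sibf[k] = ([] : List Int)) :
    sibf.modify i (· ++ r) = sibf.set i r := by
  by_cases hi : i < sibf.length
  · apply List.ext_getElem (by simp)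
    intro k hk1 hk2
    by_cases hki : k = i
    · subst hki
      have hk : k < sibf.length := by simpa using hk1
      simp [h k hk (le_refl k)]
    · simp [Ne.symm hki]
  · rw [List.modify_eq_self (by omega), List.set_eq_of_length_le (by omega)]

-- A's outer loop (inner loop already summarised by pv_innerA) rewritten with set instead
-- of modify, as long as the slots still to be written are empty.
lemma pv_outer (xs : List (List Int)) (s : Nat) (sibf : List (List Int)) (ss : List Int) (off : Int)
    (h : ∀ k (_ : k < sibf.length), s ≤ k → sibf[k] = ([] : List Int)) :
    (PySem.List.enumerate xs (s : Int)).foldl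
        (fun (st : List (List Int) × List Int × Int) p =>
          (st.1.modify p.1.toNat (· ++ PySem.List.pyRange st.2.2 (st.2.2 + p.2.length) 1),
           st.2.1 ++ p.2, st.2.2 + p.2.length)) (sibf, ss, off)
      = (((PySem.List.enumerate xs (s : Int)).foldl
            (fun (st : List (List Int) × Int) p =>
              (st.1.set p.1.toNat (PySem.List.pyRange st.2 (st.2 + p.2.length) 1),
               st.2 + p.2.length)) (sibf, off)).1,
         ss ++ xs.flatMap (fun f => f),
         ((PySem.List.enumerate xs (s : Int)).foldl
            (fun (st : List (List Int) × Int) p =>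
              (st.1.set p.1.toNat (PySem.List.pyRange st.2 (st.2 + p.2.length) 1),
               st.2 + p.2.length)) (sibf, off)).2) := by
  induction xs generalizing s sibf ss off with
  | nil => simp [PySem.List.enumerate_nil]
  | cons x xs ih =>
      rw [PySem.List.enumerate_cons]
      simp only [List.foldl_cons, Int.toNat_natCast]
      rw [pv_modify_eq_set sibf s _ h]
      have hcast : (s : Int) + 1 = ((s + 1 : Nat) : Int) := by push_cast; ring
      rw [hcast, ih (s + 1) _ (ss ++ x) _ ?_]
      · simp
      · intro k hk hs
        rw [List.getElem_set_ne (by omega)]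
        exact h k (by simpa using hk) (by omega)

-- B's recursion flattens the frames into the score list
lemma pvGo_snd (xs : List (List Int)) (off : Int) :
    (pvGo xs off).2 = xs.flatMap (fun f => f) := by
  induction xs generalizing off with
  | nil => simp [pvGo]
  | cons x t ih => simp [pvGo, ih]

-- the set-based fold fills slots s, s+1, … with exactly B's recursive index lists
lemma pv_set_go (xs : List (List Int)) (s : Nat) (sibf : List (List Int)) (off : Int)
    (h : s + xs.length ≤ sibf.length) :
    ((PySem.List.enumerate xs (s : Int)).foldl
        (fun (st : List (List Int) × Int) p =>
          (st.1.set p.1.toNat (PySem.List.pyRange st.2 (st.2 + p.2.length) 1),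
           st.2 + p.2.length)) (sibf, off)).1
      = sibf.take s ++ (pvGo xs off).1 ++ sibf.drop (s + xs.length) := by
  induction xs generalizing s sibf off with
  | nil => simp [PySem.List.enumerate_nil, pvGo]
  | cons x t ih =>
      rw [PySem.List.enumerate_cons]
      simp only [List.foldl_cons, Int.toNat_natCast]
      have hs : s < sibf.length := by simp at h; omega
      have hcast : (s : Int) + 1 = ((s + 1 : Nat) : Int) := by push_cast; ring
      rw [hcast, ih (s + 1) _ _ (by simp at h ⊢; omega)]
      have htake : ∀ r : List Int, (sibf.set s r).take (s + 1) = sibf.take s ++ [r] := by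
        intro r
        rw [List.set_eq_take_append_cons_drop, if_pos hs, List.take_append]
        simp [List.length_take, Nat.min_eq_left hs.le]
      rw [htake, List.drop_set_of_lt (show s < s + 1 + t.length by omega)]
      have harith : s + 1 + t.length = s + (x :: t).length := by simp; omega
      rw [harith]
      simp [pvGo]

-- ===== VERDICT (by name: the statement is the Claim_ definition above) =====
theorem refactorData_spec : Claim_equal_refactorData := by
  intro pkd _ hpre
  unfold Spec_refactorData refactorData refactorData_alt
  simp only [PySem.List.len_eq]
  -- 1. collapse A's inner loop (pv_innerA)
  have h1 : ∀ (st : List (List Int) × List Int × Int) (i : Int),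
      (PySem.List.pyRange 0 ((PySem.List.pyGetD pkd i []).length : Int) 1).foldl
        (fun (st : List (List Int) × List Int × Int) j =>
          (st.1.modify i.toNat (· ++ [st.2.2]),
           st.2.1 ++ [PySem.List.pyGetD (PySem.List.pyGetD pkd i []) j 0],
           st.2.2 + 1)) st
      = (st.1.modify i.toNat (· ++ PySem.List.pyRange st.2.2
            (st.2.2 + (PySem.List.pyGetD pkd i []).length) 1),
         st.2.1 ++ PySem.List.pyGetD pkd i [],
         st.2.2 + (PySem.List.pyGetD pkd i []).length) := by
    intro st i
    rw [PySem.List.foldl_pyRange_zero_pyGetD' (PySem.List.pyGetD pkd i []) 0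
      (fun (st : List (List Int) × List Int × Int) x =>
        (st.1.modify i.toNat (· ++ [st.2.2]), st.2.1 ++ [x], st.2.2 + 1)) st]
    rcases st with ⟨a, b, c⟩
    exact pv_innerA _ _ _ _ _
  simp only [h1]
  -- 2. turn A's index loop into a loop over enumerate pkd
  rw [show (PySem.List.pyRange 0 (pkd.length : Int) 1).foldl
        (fun (st : List (List Int) × List Int × Int) i =>
          (st.1.modify i.toNat (· ++ PySem.List.pyRange st.2.2
              (st.2.2 + (PySem.List.pyGetD pkd i []).length) 1),
           st.2.1 ++ PySem.List.pyGetD pkd i [],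
           st.2.2 + (PySem.List.pyGetD pkd i []).length))
        (List.replicate 10 [], [], 0)
      = (PySem.List.enumerate pkd).foldl
        (fun (st : List (List Int) × List Int × Int) p =>
          (st.1.modify p.1.toNat (· ++ PySem.List.pyRange st.2.2 (st.2.2 + p.2.length) 1),
           st.2.1 ++ p.2, st.2.2 + p.2.length))
        (List.replicate 10 [], [], 0) from by
    rw [PySem.List.enumerate_eq_map_pyRange pkd [], List.foldl_map]
    simp [PySem.List.len_eq]]
  -- 3. switch modify → set (pv_outer), then set-fold → B's recursion (pv_set_go)
  have h2 := pv_outer pkd 0 (List.replicate 10 []) [] 0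
    (fun k hk _ => List.getElem_replicate _)
  rw [show PySem.List.enumerate pkd = PySem.List.enumerate pkd ((0 : Nat) : Int) by norm_num] at *
  rw [h2]
  have h3 := pv_set_go pkd 0 (List.replicate 10 []) 0 (by simp; exact hpre)
  simp only [List.take_zero, List.nil_append, Nat.zero_add, List.drop_replicate] at h3
  rw [h3]
  simp [pvGo_snd]
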